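-- pv_equiv track=rewrite | github.com/phys-cgarnier/Bpm-Ironing-GUI | ig_cleaning.py | check_pids
-- ===== SOURCE A (Python) =====
-- def check_pids(pulse_id_dict:dict,num_measurements:int)->dict:
--     #potential undersize issue, hopefully already popped out of the list
--     pulse_key_list = [key for key in pulse_id_dict]
--
--     dev_counts_per_pid = {} #TODO: maybe type hint all these dictionaries
--     devs_per_pid = {}
--
--     for i in range(num_measurements):
--         temp_counts_per_pid = {}
--         temp_devs_per_pid = {}
--
--         for j in range(len(pulse_key_list)):
--             temp_array = []
--
--             #take the pid of the i-th measurement on j-th device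
--             if pulse_id_dict[pulse_key_list[j]][i] in temp_counts_per_pid.keys():
--
--                 #if the take the pid of the i-th measurement on j-th device is in the temporary
--                 #dictionary with pulse_ids as keys increment the count of devices with that pid
--                 temp_counts_per_pid[pulse_id_dict[pulse_key_list[j]][i]] +=1
--
--                 #append that dev to the list of devs associated with that key, note the list is instantiated on new pulse id then only appended too here
--                 temp_devs_per_pid[pulse_id_dict[pulse_key_list[j]][i]].append(pulse_key_list[j])
--             else:
--                 #if the take the pid of the i-j is not in the temporary dictionary
--                 #with pulse_ids as keys add a new key that is the pid and count 1
--                 temp_counts_per_pid[pulse_id_dict[pulse_key_list[j]][i]] =1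
--
--                 #make a new dictionary key for temp_devs_per_pid with a blank array as value,
--                 # this array will get appended any j-th dev name
--                 #that match this version of i-th pid measurement (each i-th measurement can have different pids if BSA is not working correctly)
--                 temp_devs_per_pid[pulse_id_dict[pulse_key_list[j]][i]]=temp_array
--
--                 #append the first device to this list that generated the new key
--                 temp_devs_per_pid[pulse_id_dict[pulse_key_list[j]][i]].append(pulse_key_list[j])
--
--         dev_counts_per_pid[i] = temp_counts_per_pid
--         devs_per_pid[i] = temp_devs_per_pid
--
--     return  dev_counts_per_pid, devs_per_pid
-- ===== SOURCE B (Python) =====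
-- def check_pids(pulse_id_dict: dict, num_measurements: int) -> dict:
--     names = list(pulse_id_dict)
--     dev_counts_per_pid = {}
--     devs_per_pid = {}
--     for i in range(num_measurements):
--         column = [pulse_id_dict[name][i] for name in names]
--         order = list(dict.fromkeys(column))
--         devs_per_pid[i] = {pid: [n for n, p in zip(names, column) if p == pid]
--                            for pid in order}
--         dev_counts_per_pid[i] = {pid: column.count(pid) for pid in order}
--     return dev_counts_per_pid, devs_per_pid
-- ===== Notes on version B (the rewrite author's own statement) =====
-- stated objective: alternative
-- what changed: B replaces A's single-pass incremental grouping/counting dicts with a distinct-then-filter algorithm: per measurement it extracts the pid column, dedups it into first-occurrence order, and builds each device group by a fresh filter scan over the column and each count by column.count(pid).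
import Mathlib
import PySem

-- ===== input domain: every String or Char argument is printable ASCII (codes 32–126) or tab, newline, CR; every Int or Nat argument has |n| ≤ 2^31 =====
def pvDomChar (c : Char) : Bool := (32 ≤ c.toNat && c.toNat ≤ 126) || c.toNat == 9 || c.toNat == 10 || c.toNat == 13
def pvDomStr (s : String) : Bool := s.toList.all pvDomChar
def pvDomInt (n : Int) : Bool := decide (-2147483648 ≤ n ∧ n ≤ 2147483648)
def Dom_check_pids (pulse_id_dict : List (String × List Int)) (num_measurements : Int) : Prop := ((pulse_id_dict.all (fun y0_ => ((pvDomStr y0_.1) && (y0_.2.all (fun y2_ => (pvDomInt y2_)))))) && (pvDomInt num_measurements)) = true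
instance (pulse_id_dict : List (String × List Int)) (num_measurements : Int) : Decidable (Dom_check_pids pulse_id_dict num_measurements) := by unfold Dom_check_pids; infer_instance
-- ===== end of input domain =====

-- B uses a distinct-then-filter algorithm: per measurement it extracts the pid column, dedups it,
-- and builds each group by a fresh filter scan and each count by column.count — no incremental
-- grouping dict (objective: alternative; same results, different traversal).

-- ===== PORT A =====
def check_pids (pulse_id_dict : List (String × List Int)) (num_measurements : Int) :
    (List (Int × List (Int × Int))) × (List (Int × List (Int × List String))) :=
  let d := PySem.Dict.mk pulse_id_dict
  let pulse_key_list := pulse_id_dict.map (fun p => p.1)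
  let r :=
    (PySem.List.pyRange 0 num_measurements 1).foldl
      (fun (acc : PySem.Dict Int (PySem.Dict Int Int) × PySem.Dict Int (PySem.Dict Int (List String))) i =>
        let temp :=
          (PySem.List.pyRange 0 (PySem.List.len pulse_key_list) 1).foldl
            (fun (t : PySem.Dict Int Int × PySem.Dict Int (List String)) j =>
              let key := PySem.List.pyGetD pulse_key_list j ""
              -- pulse_id_dict[pulse_key_list[j]][i]; Pre_ guarantees the index is in range
              let pid := PySem.List.pyGetD (d.getD key []) i 0
              if t.1.contains pid then
                (t.1.insert pid (t.1.getD pid 0 + 1), t.2.modify pid [] (fun l => l ++ [key]))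
              else
                (t.1.insert pid 1, (t.2.insert pid []).modify pid [] (fun l => l ++ [key])))
            (PySem.Dict.empty, PySem.Dict.empty)
        (acc.1.insert i temp.1, acc.2.insert i temp.2))
      (PySem.Dict.empty, PySem.Dict.empty)
  (r.1.items.map (fun p => (p.1, p.2.items)), r.2.items.map (fun p => (p.1, p.2.items)))

-- ===== PORT B =====
def check_pids_alt (pulse_id_dict : List (String × List Int)) (num_measurements : Int) :
    (List (Int × List (Int × Int))) × (List (Int × List (Int × List String))) :=
  let d := PySem.Dict.mk pulse_id_dict
  let names := pulse_id_dict.map (fun p => p.1)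
  let r :=
    (PySem.List.pyRange 0 num_measurements 1).foldl
      (fun (acc : PySem.Dict Int (PySem.Dict Int Int) × PySem.Dict Int (PySem.Dict Int (List String))) i =>
        let column := names.map (fun name => PySem.List.pyGetD (d.getD name []) i 0)
        let order := PySem.List.dedup column
        (acc.1.insert i (PySem.Dict.mk (order.map (fun pid =>
            (pid, (PySem.List.count column pid : Int))))),
         acc.2.insert i (PySem.Dict.mk (order.map (fun pid =>
            (pid, ((names.zip column).filter (fun q => q.2 == pid)).map (fun q => q.1)))))))
      (PySem.Dict.empty, PySem.Dict.empty)
  (r.1.items.map (fun p => (p.1, p.2.items)), r.2.items.map (fun p => (p.1, p.2.items)))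

-- ===== PRECONDITION & SPEC =====
-- Pre_ excludes (a) association lists with duplicate keys, which do not represent a Python dict
-- (A receives a dict, so duplicates cannot reach it), and (b) inputs where some device's list is
-- shorter than num_measurements, on which A raises IndexError.
def Pre_check_pids (pulse_id_dict : List (String × List Int)) (num_measurements : Int) : Prop :=
  (pulse_id_dict.map (fun p => p.1)).Nodup ∧
  (num_measurements ≤ 0 ∨ ∀ p ∈ pulse_id_dict, num_measurements ≤ p.2.length)
instance (pulse_id_dict : List (String × List Int)) (num_measurements : Int) : Decidable (Pre_check_pids pulse_id_dict num_measurements) := by unfold Pre_check_pids; infer_instance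

def pvWitness_check_pids : (List (String × List Int)) × Int :=
  ([("bpm1", [7, 8]), ("bpm2", [7, 9])], 2)

def Spec_check_pids (pulse_id_dict : List (String × List Int)) (num_measurements : Int) (out : (List (Int × List (Int × Int))) × (List (Int × List (Int × List String)))) : Prop := out = check_pids_alt pulse_id_dict num_measurements
instance (pulse_id_dict : List (String × List Int)) (num_measurements : Int) (out : (List (Int × List (Int × Int))) × (List (Int × List (Int × List String)))) : Decidable (Spec_check_pids pulse_id_dict num_measurements out) := by unfold Spec_check_pids; infer_instance

-- ===== CLAIM (what is proved, stated in full; the proofs are below) =====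
def Claim_equal_check_pids : Prop := ∀ (pulse_id_dict : List (String × List Int)) (num_measurements : Int), Dom_check_pids pulse_id_dict num_measurements → Pre_check_pids pulse_id_dict num_measurements → Spec_check_pids pulse_id_dict num_measurements (check_pids pulse_id_dict num_measurements)

-- ===== LEMMAS AND PROOFS =====
-- the grouping dict A's inner loop builds, as a plain fold over the pairs
def groupDevs (pl : List (String × List Int)) (i : Int) : PySem.Dict Int (List String) :=
  pl.foldl (fun (g : PySem.Dict Int (List String)) p =>
    g.modify (PySem.List.pyGetD p.2 i 0) [] (fun l => l ++ [p.1])) PySem.Dict.empty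

def mapLen (g : PySem.Dict Int (List String)) : PySem.Dict Int Int :=
  PySem.Dict.mk (g.items.map (fun q => (q.1, (q.2.length : Int))))
lemma get?_mapLen (g : PySem.Dict Int (List String)) (k : Int) :
    (mapLen g).get? k = (g.get? k).map (fun v => (v.length : Int)) := by
  obtain ⟨l⟩ := g
  show (PySem.Dict.mk (l.map (fun q => (q.1, (q.2.length : Int))))).get? k
      = ((PySem.Dict.mk l).get? k).map (fun v => (v.length : Int))
  induction l with
  | nil => rfl
  | cons p rest ih =>
    rw [List.map_cons, PySem.Dict.get?_mk_cons, PySem.Dict.get?_mk_cons]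
    by_cases h : (p.1 == k) <;> simp [h, ih]
lemma contains_mapLen (g : PySem.Dict Int (List String)) (k : Int) :
    (mapLen g).contains k = g.contains k := by
  rw [PySem.Dict.contains_eq_isSome_get?, PySem.Dict.contains_eq_isSome_get?, get?_mapLen]
  cases g.get? k <;> rfl
lemma mapLen_insert (g : PySem.Dict Int (List String)) (k : Int) (v : List String) :
    mapLen (g.insert k v) = (mapLen g).insert k (v.length : Int) := by
  apply PySem.Dict.ext
  show (PySem.Dict.mk ((g.insert k v).items.map (fun q => (q.1, (q.2.length : Int))))).items
      = ((mapLen g).insert k (v.length : Int)).items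
  rw [PySem.Dict.items_insert, PySem.Dict.items_insert, contains_mapLen]
  split_ifs with h
  · show ((g.items.map _).map _) = _
    simp only [mapLen, List.map_map]
    apply List.map_congr_left
    intro q _
    simp only [Function.comp_apply, beq_iff_eq]
    split_ifs with hq <;> simp
  · simp [mapLen]
lemma getD_mapLen (g : PySem.Dict Int (List String)) (k : Int) (h : g.contains k = true) :
    (mapLen g).getD k 0 = ((g.getD k []).length : Int) := by
  rw [PySem.Dict.contains_eq_isSome_get?] at h
  obtain ⟨v, hv⟩ := Option.isSome_iff_exists.mp h
  rw [PySem.Dict.getD_eq_get?_getD, PySem.Dict.getD_eq_get?_getD, get?_mapLen, hv]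
  rfl
lemma items_mapLen (g : PySem.Dict Int (List String)) :
    (mapLen g).items = g.items.map (fun q => (q.1, (q.2.length : Int))) := rfl

lemma inner_eq (i : Int) (l : List (String × List Int)) (g : PySem.Dict Int (List String)) :
    l.foldl
      (fun (t : PySem.Dict Int Int × PySem.Dict Int (List String)) p =>
        let pid := PySem.List.pyGetD p.2 i 0
        if t.1.contains pid then
          (t.1.insert pid (t.1.getD pid 0 + 1), t.2.modify pid [] (fun l => l ++ [p.1]))
        else
          (t.1.insert pid 1, (t.2.insert pid []).modify pid [] (fun l => l ++ [p.1])))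
      (mapLen g, g)
    = (mapLen (l.foldl (fun (g : PySem.Dict Int (List String)) p =>
          g.modify (PySem.List.pyGetD p.2 i 0) [] (fun l => l ++ [p.1])) g),
       l.foldl (fun (g : PySem.Dict Int (List String)) p =>
          g.modify (PySem.List.pyGetD p.2 i 0) [] (fun l => l ++ [p.1])) g) := by
  induction l generalizing g with
  | nil => rfl
  | cons p rest ih =>
    simp only [List.foldl_cons]
    have hstep :
        (let pid := PySem.List.pyGetD p.2 i 0
         if (mapLen g).contains pid then
           ((mapLen g).insert pid ((mapLen g).getD pid 0 + 1), g.modify pid [] (fun l => l ++ [p.1]))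
         else
           ((mapLen g).insert pid 1, (g.insert pid []).modify pid [] (fun l => l ++ [p.1])))
        = (mapLen (g.modify (PySem.List.pyGetD p.2 i 0) [] (fun l => l ++ [p.1])),
           g.modify (PySem.List.pyGetD p.2 i 0) [] (fun l => l ++ [p.1])) := by
      set pid := PySem.List.pyGetD p.2 i 0 with hpid
      simp only [contains_mapLen, PySem.Dict.modify]
      by_cases h : g.contains pid
      · simp only [h, if_true]
        rw [mapLen_insert]
        have hlen : ((g.getD pid [] ++ [p.1]).length : Int) = (mapLen g).getD pid 0 + 1 := by
          rw [getD_mapLen g pid h]; simp only [List.length_append, List.length_cons, List.length_nil]; push_cast; ring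
        rw [hlen]
      · simp only [h, Bool.false_eq_true, if_false]
        rw [PySem.Dict.getD_of_not_contains g [] (by simpa using h), mapLen_insert,
          PySem.Dict.getD_insert_self, PySem.Dict.insert_insert_self]
        rfl
    rw [hstep]
    exact ih _

lemma temp_eq (pl : List (String × List Int)) (hnd : (pl.map (fun p => p.1)).Nodup) (i : Int) :
    (PySem.List.pyRange 0 (PySem.List.len (pl.map (fun p => p.1))) 1).foldl
      (fun (t : PySem.Dict Int Int × PySem.Dict Int (List String)) j =>
        let key := PySem.List.pyGetD (pl.map (fun p => p.1)) j ""
        let pid := PySem.List.pyGetD ((PySem.Dict.mk pl).getD key []) i 0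
        if t.1.contains pid then
          (t.1.insert pid (t.1.getD pid 0 + 1), t.2.modify pid [] (fun l => l ++ [key]))
        else
          (t.1.insert pid 1, (t.2.insert pid []).modify pid [] (fun l => l ++ [key])))
      (PySem.Dict.empty, PySem.Dict.empty)
    = (mapLen (groupDevs pl i), groupDevs pl i) := by
  rw [PySem.List.foldl_pyRange_zero_pyGetD (pl.map (fun p => p.1)) ""
      (fun (t : PySem.Dict Int Int × PySem.Dict Int (List String)) key =>
        let pid := PySem.List.pyGetD ((PySem.Dict.mk pl).getD key []) i 0
        if t.1.contains pid then
          (t.1.insert pid (t.1.getD pid 0 + 1), t.2.modify pid [] (fun l => l ++ [key]))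
        else
          (t.1.insert pid 1, (t.2.insert pid []).modify pid [] (fun l => l ++ [key])))
      (PySem.Dict.empty, PySem.Dict.empty), List.foldl_map]
  rw [PySem.List.foldl_congr_mem pl _
      (fun (t : PySem.Dict Int Int × PySem.Dict Int (List String)) p =>
        let pid := PySem.List.pyGetD p.2 i 0
        if t.1.contains pid then
          (t.1.insert pid (t.1.getD pid 0 + 1), t.2.modify pid [] (fun l => l ++ [p.1]))
        else
          (t.1.insert pid 1, (t.2.insert pid []).modify pid [] (fun l => l ++ [p.1])))
      _ ?_]
  · exact inner_eq i pl PySem.Dict.empty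
  · intro acc p hp
    have hmem : (p.1, p.2) ∈ (PySem.Dict.mk pl).items := by simpa using hp
    rw [PySem.Dict.getD_of_mem_items _ hmem (by simpa using hnd) []]

-- B's column for index i is the map of A's per-pair pid function over pl
lemma column_eq (pl : List (String × List Int)) (hnd : (pl.map (fun p => p.1)).Nodup) (i : Int) :
    (pl.map (fun p => p.1)).map
        (fun name => PySem.List.pyGetD ((PySem.Dict.mk pl).getD name []) i 0)
      = pl.map (fun p => PySem.List.pyGetD p.2 i 0) := by
  rw [List.map_map]
  apply List.map_congr_left
  intro p hp
  have hmem : (p.1, p.2) ∈ (PySem.Dict.mk pl).items := by simpa using hp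
  simp only [Function.comp_apply]
  rw [PySem.Dict.getD_of_mem_items _ hmem (by simpa using hnd) []]

lemma keys_groupDevs (pl : List (String × List Int)) (i : Int) :
    (groupDevs pl i).keys
      = PySem.Set.ofList (pl.map (fun p => PySem.List.pyGetD p.2 i 0)) := by
  unfold groupDevs
  have h := PySem.Dict.keys_foldl_modify_key pl (fun p => PySem.List.pyGetD p.2 i 0)
      ([] : List String) (fun _ p => (fun l => l ++ [p.1])) PySem.Dict.empty
  rw [PySem.Dict.keys_empty, PySem.Set.update_nil_left] at h
  exact h

lemma getD_groupDevs (pl : List (String × List Int)) (i : Int) (c : Int) :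
    (groupDevs pl i).getD c []
      = (pl.filter (fun p => PySem.List.pyGetD p.2 i 0 == c)).map (fun p => p.1) := by
  unfold groupDevs
  have h : pl.foldl (fun (g : PySem.Dict Int (List String)) p =>
        g.modify (PySem.List.pyGetD p.2 i 0) [] (fun l => l ++ [p.1])) PySem.Dict.empty
      = (pl.map (fun p => (PySem.List.pyGetD p.2 i 0, p.1))).foldl
          (fun (g : PySem.Dict Int (List String)) q =>
            g.modify q.1 [] (fun l => l ++ [q.2])) PySem.Dict.empty := by
    rw [List.foldl_map]
  rw [h, PySem.Dict.getD_foldl_modify_append, PySem.Dict.getD_empty, List.nil_append,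
    List.filter_map, List.map_map]
  rfl

lemma nodup_keys_groupDevs (pl : List (String × List Int)) (i : Int) :
    (groupDevs pl i).keys.Nodup := by
  unfold groupDevs
  exact PySem.Dict.nodup_keys_foldl_modify_key pl (fun p => PySem.List.pyGetD p.2 i 0) []
    (fun _ p => (fun l => l ++ [p.1])) PySem.Dict.empty (by simp)

-- per measurement: A's grouping dict IS B's dedup/filter dict, and likewise for counts
lemma devs_dict_eq (pl : List (String × List Int)) (hnd : (pl.map (fun p => p.1)).Nodup) (i : Int) :
    groupDevs pl i
      = PySem.Dict.mk ((PySem.List.dedup ((pl.map (fun p => p.1)).map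
            (fun name => PySem.List.pyGetD ((PySem.Dict.mk pl).getD name []) i 0))).map
          (fun pid => (pid, (((pl.map (fun p => p.1)).zip ((pl.map (fun p => p.1)).map
              (fun name => PySem.List.pyGetD ((PySem.Dict.mk pl).getD name []) i 0))).filter
            (fun q => q.2 == pid)).map (fun q => q.1)))) := by
  apply PySem.Dict.ext
  rw [PySem.Dict.items_eq_map_keys (groupDevs pl i) (nodup_keys_groupDevs pl i) [],
    keys_groupDevs pl i, column_eq pl hnd i]
  show _ = (PySem.List.dedup (pl.map (fun p => PySem.List.pyGetD p.2 i 0))).map _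
  rw [PySem.List.dedup_eq_ofList]
  apply List.map_congr_left
  intro pid _
  rw [getD_groupDevs pl i pid]
  have hzip : (pl.map (fun p => p.1)).zip (pl.map (fun p => PySem.List.pyGetD p.2 i 0))
      = pl.map (fun p => (p.1, PySem.List.pyGetD p.2 i 0)) := by
    rw [List.zip_map']
  rw [hzip, List.filter_map, List.map_map]
  rfl

lemma counts_dict_eq (pl : List (String × List Int)) (hnd : (pl.map (fun p => p.1)).Nodup) (i : Int) :
    mapLen (groupDevs pl i)
      = PySem.Dict.mk ((PySem.List.dedup ((pl.map (fun p => p.1)).map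
            (fun name => PySem.List.pyGetD ((PySem.Dict.mk pl).getD name []) i 0))).map
          (fun pid => (pid, (PySem.List.count ((pl.map (fun p => p.1)).map
            (fun name => PySem.List.pyGetD ((PySem.Dict.mk pl).getD name []) i 0)) pid : Int)))) := by
  apply PySem.Dict.ext
  rw [items_mapLen, PySem.Dict.items_eq_map_keys (groupDevs pl i) (nodup_keys_groupDevs pl i) [],
    keys_groupDevs pl i, column_eq pl hnd i, List.map_map]
  show _ = (PySem.List.dedup (pl.map (fun p => PySem.List.pyGetD p.2 i 0))).map _
  rw [PySem.List.dedup_eq_ofList]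
  apply List.map_congr_left
  intro pid _
  simp only [Function.comp_apply]
  rw [getD_groupDevs pl i pid]
  congr 1
  rw [PySem.List.count_eq]
  simp only [List.length_map, List.count_eq_countP, List.countP_map]
  simp only [List.countP_eq_length_filter]
  congr 1

lemma main_eq (pl : List (String × List Int)) (n : Int)
    (hnd : (pl.map (fun p => p.1)).Nodup) :
    check_pids pl n = check_pids_alt pl n := by
  simp only [check_pids, check_pids_alt]
  rw [PySem.List.foldl_congr_mem (PySem.List.pyRange 0 n 1) _
      (fun (acc : PySem.Dict Int (PySem.Dict Int Int) × PySem.Dict Int (PySem.Dict Int (List String))) i =>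
        (acc.1.insert i (mapLen (groupDevs pl i)), acc.2.insert i (groupDevs pl i)))
      _ (by intro acc i _; rw [temp_eq pl hnd i])]
  have hB := PySem.List.foldl_congr_mem (PySem.List.pyRange 0 n 1)
      (fun (acc : PySem.Dict Int (PySem.Dict Int Int) × PySem.Dict Int (PySem.Dict Int (List String))) i =>
        (acc.1.insert i (PySem.Dict.mk ((PySem.List.dedup ((pl.map (fun p => p.1)).map
              (fun name => PySem.List.pyGetD ((PySem.Dict.mk pl).getD name []) i 0))).map
            (fun pid => (pid, (PySem.List.count ((pl.map (fun p => p.1)).map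
              (fun name => PySem.List.pyGetD ((PySem.Dict.mk pl).getD name []) i 0)) pid : Int))))),
         acc.2.insert i (PySem.Dict.mk ((PySem.List.dedup ((pl.map (fun p => p.1)).map
              (fun name => PySem.List.pyGetD ((PySem.Dict.mk pl).getD name []) i 0))).map
            (fun pid => (pid, (((pl.map (fun p => p.1)).zip ((pl.map (fun p => p.1)).map
                (fun name => PySem.List.pyGetD ((PySem.Dict.mk pl).getD name []) i 0))).filter
              (fun q => q.2 == pid)).map (fun q => q.1)))))))
      (fun acc i => (acc.1.insert i (mapLen (groupDevs pl i)), acc.2.insert i (groupDevs pl i)))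
      (PySem.Dict.empty, PySem.Dict.empty)
      (by intro acc i _
          show _ = (acc.1.insert i (mapLen (groupDevs pl i)), acc.2.insert i (groupDevs pl i))
          rw [counts_dict_eq pl hnd i, devs_dict_eq pl hnd i])
  rw [hB]

-- ===== VERDICT (by name: the statement is the Claim_ definition above) =====
theorem check_pids_spec : Claim_equal_check_pids := by
  intro pulse_id_dict num_measurements _ hpre
  exact main_eq pulse_id_dict num_measurements hpre.1
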